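-- pv_equiv track=rewrite | github.com/cowboysmall-comp/hackerrank | src/algorithms/dynamic_programming/sherlock_and_cost.py | cost
-- ===== SOURCE A (Python) =====
-- def cost(N, B):
--     L = 0
--     H = 0
--
--     for i in range(1, N):
--         l = max(H + abs(B[i - 1] - 1),    L)
--         h = max(H + abs(B[i] - B[i - 1]), L + abs(B[i] - 1))
--         L = l
--         H = h
--
--     return max(L, H)
-- ===== SOURCE B (Python) =====
-- def cost(N, B):
--     # Backward suffix DP: P = best cost for the suffix given the previous
--     # element was set to 1; Q = best cost given it kept its own value.
--     if N <= 1: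
--         return 0
--     ys = B[:N]
--     P = Q = 0
--     for u, x in reversed(list(zip(ys, ys[1:]))):
--         P, Q = max(P, abs(x - 1) + Q), max(abs(1 - u) + P, abs(x - u) + Q)
--     return max(P, Q)
-- ===== Notes on version B (the rewrite author's own statement) =====
-- stated objective: alternative
-- what changed: Replaces A's forward index-driven DP (prefix bests L/H for last element set to 1 or kept) by a backward suffix DP over reversed consecutive pairs (suffix bests P/Q given the previous element's choice), seeded at 0 from the right.
import Mathlib
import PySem

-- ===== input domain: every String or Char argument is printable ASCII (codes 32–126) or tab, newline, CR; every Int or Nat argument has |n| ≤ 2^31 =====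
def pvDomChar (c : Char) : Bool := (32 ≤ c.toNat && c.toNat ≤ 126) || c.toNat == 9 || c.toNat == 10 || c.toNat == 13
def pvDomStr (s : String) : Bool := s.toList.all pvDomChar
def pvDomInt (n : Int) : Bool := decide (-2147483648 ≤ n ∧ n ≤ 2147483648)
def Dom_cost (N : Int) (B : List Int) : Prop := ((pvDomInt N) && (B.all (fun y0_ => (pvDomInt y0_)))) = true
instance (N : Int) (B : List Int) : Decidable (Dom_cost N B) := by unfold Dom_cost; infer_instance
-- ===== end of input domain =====

-- B replaces A's forward index-driven two-state DP by a backward suffix DP over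
-- reversed consecutive pairs; alternative decomposition, same cost.


-- ===== PORT A =====
-- for i in range(1, N): l = max(H + abs(B[i-1]-1), L); h = max(H + abs(B[i]-B[i-1]), L + abs(B[i]-1))
-- pyGetD with default 0 is exact under Pre_cost (every index 1 ≤ i < N ≤ len B is in range)
def cost (N : Int) (B : List Int) : Int :=
  let r := (PySem.List.pyRange 1 N 1).foldl
    (fun (p : Int × Int) i =>
      let l := max (p.2 + |PySem.List.pyGetD B (i - 1) 0 - 1|) p.1
      let h := max (p.2 + |PySem.List.pyGetD B i 0 - PySem.List.pyGetD B (i - 1) 0|)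
                   (p.1 + |PySem.List.pyGetD B i 0 - 1|)
      (l, h)) (0, 0)
  max r.1 r.2

-- ===== PORT B =====
-- if N <= 1: return 0; ys = B[:N]; fold reversed(zip(ys, ys[1:])) with suffix bests (P, Q)
def cost_alt (N : Int) (B : List Int) : Int :=
  if N ≤ 1 then 0
  else
    let ys := PySem.List.slice B none (some N)
    let r := ((ys.zip (PySem.List.slice ys (some 1) none)).reverse).foldl
      (fun (pq : Int × Int) ux =>
        (max pq.1 (|ux.2 - 1| + pq.2), max (|1 - ux.1| + pq.1) (|ux.2 - ux.1| + pq.2)))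
      (0, 0)
    max r.1 r.2

-- ===== PRECONDITION & SPEC =====
-- Pre_ excludes exactly the inputs where A raises IndexError: 2 ≤ N with fewer than N elements.
def Pre_cost (N : Int) (B : List Int) : Prop := N ≤ 1 ∨ N ≤ B.length
instance (N : Int) (B : List Int) : Decidable (Pre_cost N B) := by unfold Pre_cost; infer_instance
def pvWitness_cost : Int × List Int := (3, [5, 1, 100])

def Spec_cost (N : Int) (B : List Int) (out : Int) : Prop := out = cost_alt N B
instance (N : Int) (B : List Int) (out : Int) : Decidable (Spec_cost N B out) := by unfold Spec_cost; infer_instance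

-- ===== CLAIM (what is proved, stated in full; the proofs are below) =====
def Claim_equal_cost : Prop := ∀ (N : Int) (B : List Int), Dom_cost N B → Pre_cost N B → Spec_cost N B (cost N B)

-- ===== LEMMAS AND PROOFS =====

-- A's forward step on a pair (u, x) = (B[i-1], B[i])
def stepA (p : Int × Int) (ux : Int × Int) : Int × Int :=
  (max (p.2 + |ux.1 - 1|) p.1, max (p.2 + |ux.2 - ux.1|) (p.1 + |ux.2 - 1|))

-- B's backward recurrence as a foldr over the (unreversed) pairs list
def gB (zs : List (Int × Int)) : Int × Int :=
  zs.foldr (fun ux pq =>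
    (max pq.1 (|ux.2 - 1| + pq.2), max (|1 - ux.1| + pq.1) (|ux.2 - ux.1| + pq.2))) (0, 0)

-- master lemma: forward prefix DP and backward suffix DP combine to the same optimum
theorem forward_backward (zs : List (Int × Int)) :
    ∀ L H : Int, max (zs.foldl stepA (L, H)).1 (zs.foldl stepA (L, H)).2
      = max (L + (gB zs).1) (H + (gB zs).2) := by
  induction zs with
  | nil => intro L H; simp [gB]
  | cons ux zs ih =>
    intro L H
    have h1 : |(1 : Int) - ux.1| = |ux.1 - 1| := abs_sub_comm _ _
    simp only [List.foldl_cons, gB, List.foldr_cons, stepA]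
    rw [ih]
    show max _ _ = max (L + max (gB zs).1 (|ux.2 - 1| + (gB zs).2))
                       (H + max (|1 - ux.1| + (gB zs).1) (|ux.2 - ux.1| + (gB zs).2))
    rw [h1]
    omega

-- the consecutive-pairs list of the first n elements, in closed getD form
theorem pairs_eq (B : List Int) (n : Nat) (hn : n ≤ B.length) :
    (B.take n).zip (B.take n).tail
      = (List.range (n - 1)).map (fun k => (B.getD k 0, B.getD (k + 1) 0)) := by
  apply List.ext_getElem
  · simp [List.length_zip, List.length_tail]
    omega
  · intro k hk hk'
    have hkn : k < n - 1 := by simpa using hk'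
    have h1 : k < B.length := by omega
    have h2 : k + 1 < B.length := by omega
    simp [List.getElem_zip, List.getElem_tail, List.getElem_take, h1, h2]

-- ===== VERDICT (by name: the statements are the Claim_ definitions above) =====
theorem cost_spec : Claim_equal_cost := by
  intro N B _ hp
  unfold Spec_cost cost cost_alt
  by_cases h1 : N ≤ 1
  · rw [PySem.List.pyRange_one_eq_nil (by omega : N ≤ 1)]
    simp [h1]
  · have hN2 : (2 : Int) ≤ N := by omega
    have hlen : N ≤ (B.length : Int) := by
      rcases hp with h | h
      · omega
      · exact_mod_cast h
    have hNn : N = ((N.toNat : Nat) : Int) := by omega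
    set n := N.toNat with hdefn
    have hnlen : n ≤ B.length := by omega
    have hn2 : 2 ≤ n := by omega
    rw [if_neg h1]
    -- B side: slices to take/tail, reversed foldl to foldr (= gB)
    simp only [hNn, PySem.List.slice_to_natCast, PySem.List.slice_from_one,
      List.foldl_reverse]
    -- A side: pyRange to range-map, then to a fold of stepA over the pairs list
    have hsub : (((n : Int)) - 1).toNat = n - 1 := by omega
    simp only [PySem.List.pyRange_one, hsub, List.foldl_map]
    have hcong : List.foldl
        (fun (p : Int × Int) (k : Nat) =>
          let i : Int := 1 + (k : Int)
          let l := max (p.2 + |PySem.List.pyGetD B (i - 1) 0 - 1|) p.1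
          let h := max (p.2 + |PySem.List.pyGetD B i 0 - PySem.List.pyGetD B (i - 1) 0|)
                       (p.1 + |PySem.List.pyGetD B i 0 - 1|)
          (l, h)) (0, 0) (List.range (n - 1))
        = List.foldl (fun p k => stepA p (B.getD k 0, B.getD (k + 1) 0)) (0, 0)
            (List.range (n - 1)) := by
      apply PySem.List.foldl_congr_mem
      intro acc k _
      have e1 : (1 : Int) + (k : Int) - 1 = ((k : Nat) : Int) := by omega
      have e2 : (1 : Int) + (k : Int) = (((k + 1 : Nat)) : Int) := by push_cast; ring
      simp only [e1]
      simp only [e2]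
      simp only [PySem.List.pyGetD_natCast, stepA]
    rw [hcong, ← List.foldl_map, ← pairs_eq B n hnlen]
    show max _ _ = _
    have hfb := forward_backward ((B.take n).zip (B.take n).tail) 0 0
    simp only [zero_add] at hfb
    exact hfb
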